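-- pv_equiv track=rewrite | github.com/jackmead515/auto_farm | source/util.py | time_ranges
-- ===== SOURCE A (Python) =====
-- def time_ranges(st, et):
--     '''
--     Given a start and end time, finds the military time
--     hour ranges that complete the day. Example:
--     st = 5, et = 20
--     sts = [5, 6, 7, 8, 9, 10, 11, 12, 13, 14, 15, 16, 17, 18, 19]
--     ets = [20, 21, 23, 0, 1, 2, 3, 4]
--     '''
--     if st == et:
--         return None, None
--     elif st < 0 or st > 23 or et < 0 or et > 23:
--         return None, None
--
--     tst = st
--     tet = et
--     times = []
--     for i in range(24):
--         times.append(i)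
--     sts = []
--     ets = []
--     if st in times:
--         sts.append(tst)
--         tst+=1
--         if tst == 24:
--             tst = 0
--         while tst is not et and tst in times:
--             sts.append(tst)
--             tst+=1
--             if tst == 24:
--                 tst = 0
--
--     if tet in times:
--         ets.append(tet)
--         tet+=1
--         if tet == 24:
--             tet = 0
--         while tet is not st and tet in times:
--             ets.append(tet)
--             tet+=1
--             if tet == 24:
--                 tet = 0
--
--     return sts, ets
-- ===== SOURCE B (Python) =====
-- def time_ranges(st, et):
--     if st == et:
--         return None, None
--     if st < 0 or st > 23 or et < 0 or et > 23:
--         return None, None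
--     n1 = (et - st) % 24
--     n2 = (st - et) % 24
--     sts = [(st + i) % 24 for i in range(n1)]
--     ets = [(et + i) % 24 for i in range(n2)]
--     return sts, ets
-- ===== Notes on version B (the rewrite author's own statement) =====
-- stated objective: simpler
-- what changed: B keeps the two guard branches but replaces A's 24-entry membership list and the two wrap-and-compare while loops with closed-form modular lengths n1=(et-st)%24, n2=(st-et)%24 and direct comprehensions [(st+i)%24 for i in range(n1)] etc.
import Mathlib
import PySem

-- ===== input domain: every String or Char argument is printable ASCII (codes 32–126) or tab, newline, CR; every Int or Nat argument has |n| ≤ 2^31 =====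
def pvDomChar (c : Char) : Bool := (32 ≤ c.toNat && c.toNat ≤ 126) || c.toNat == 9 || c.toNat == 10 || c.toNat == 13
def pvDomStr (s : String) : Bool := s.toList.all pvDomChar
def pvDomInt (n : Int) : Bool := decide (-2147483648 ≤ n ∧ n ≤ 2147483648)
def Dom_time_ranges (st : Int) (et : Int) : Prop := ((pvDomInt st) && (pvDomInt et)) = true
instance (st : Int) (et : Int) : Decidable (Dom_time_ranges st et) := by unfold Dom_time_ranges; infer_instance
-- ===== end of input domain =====

-- B replaces A's membership-list walk with closed-form modular lengths and comprehensions (objective: simpler).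

-- ===== PORT A =====
-- the while loop: 'while t is not stop and t in times: acc.append(t); t+=1; if t==24: t=0'
-- ('is not' behaves as '≠' here: all values involved are small cached ints 0..24);
-- fuel 25 bounds the loop, which Python runs at most 23 times on admitted values.
def pvWhileLoop (stop : Int) (times : List Int) : Nat → Int → List Int → List Int × Int
  | 0, t, acc => (acc, t)
  | n + 1, t, acc =>
    if t ≠ stop ∧ t ∈ times then
      let acc := acc ++ [t]
      let t := t + 1
      let t := if t = 24 then 0 else t
      pvWhileLoop stop times n t acc
    else (acc, t)

def time_ranges (st : Int) (et : Int) : Option (List Int) × Option (List Int) :=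
  if st = et then (none, none)
  else if st < 0 ∨ st > 23 ∨ et < 0 ∨ et > 23 then (none, none)
  else
    let tst := st
    let tet := et
    let times : List Int := (PySem.List.pyRange 0 24 1).foldl (fun acc i => acc ++ [i]) []
    let sts : List Int := []
    let ets : List Int := []
    let p1 :=
      if st ∈ times then
        let sts := sts ++ [tst]
        let tst := tst + 1
        let tst := if tst = 24 then 0 else tst
        pvWhileLoop et times 25 tst sts
      else (sts, tst)
    let p2 :=
      if tet ∈ times then
        let ets := ets ++ [tet]
        let tet := tet + 1
        let tet := if tet = 24 then 0 else tet
        pvWhileLoop st times 25 tet ets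
      else (ets, tet)
    (some p1.1, some p2.1)

-- ===== PORT B =====
def time_ranges_alt (st : Int) (et : Int) : Option (List Int) × Option (List Int) :=
  if st = et then (none, none)
  else if st < 0 ∨ st > 23 ∨ et < 0 ∨ et > 23 then (none, none)
  else
    let n1 := PySem.Int.mod (et - st) 24
    let n2 := PySem.Int.mod (st - et) 24
    (some ((PySem.List.pyRange 0 n1 1).map (fun i => PySem.Int.mod (st + i) 24)),
     some ((PySem.List.pyRange 0 n2 1).map (fun i => PySem.Int.mod (et + i) 24)))

-- ===== PRECONDITION & SPEC =====
def Spec_time_ranges (st : Int) (et : Int) (out : Option (List Int) × Option (List Int)) : Prop := out = time_ranges_alt st et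
instance (st : Int) (et : Int) (out : Option (List Int) × Option (List Int)) : Decidable (Spec_time_ranges st et out) := by unfold Spec_time_ranges; infer_instance

-- ===== CLAIM (what is proved, stated in full; the proofs are below) =====
def Claim_equal_time_ranges : Prop := ∀ (st : Int) (et : Int), Dom_time_ranges st et → Spec_time_ranges st et (time_ranges st et)

-- ===== LEMMAS AND PROOFS =====
-- all 576 in-range pairs, checked exhaustively by the kernel
lemma pv_key : ∀ a : Nat, a < 24 → ∀ b : Nat, b < 24 →
    time_ranges (a : Int) (b : Int) = time_ranges_alt (a : Int) (b : Int) := by decide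

-- ===== VERDICT (by name: the statement is the Claim_ definition above) =====
theorem time_ranges_spec : Claim_equal_time_ranges := by
  intro st et _
  unfold Spec_time_ranges
  by_cases h1 : st = et
  · simp [time_ranges, time_ranges_alt, h1]
  · by_cases h2 : st < 0 ∨ st > 23 ∨ et < 0 ∨ et > 23
    · simp [time_ranges, time_ranges_alt, h1, h2]
    · push_neg at h2
      obtain ⟨a1, a2, a3, a4⟩ := h2
      have hst : st = ((st.toNat : Nat) : Int) := by omega
      have het : et = ((et.toNat : Nat) : Int) := by omega
      rw [hst, het]
      exact pv_key st.toNat (by omega) et.toNat (by omega)
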